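-- pv_equiv track=rewrite | github.com/JianghanLi/LintCode | Contest 31 Weekly #17/1401. Twitch Words/li.py | twitchWords
-- ===== SOURCE A (Python) =====
-- def twitchWords(S):
--     # Write your code here
--     i, j, N = 0, 0, len(S)
--     res = []
--     while j < N:
--         while j < N and S[j] == S[i]:
--             j += 1
--         if j - i >= 3:
--             res.append((i, j - 1))
--         i = j
--     return res
-- ===== SOURCE B (Python) =====
-- def twitchWords(S):
--     # Run-length encode S first, then emit the runs of length >= 3.
--     runs = []
--     for c in S:
--         if runs and runs[-1][0] == c:
--             runs[-1] = (c, runs[-1][1] + 1)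
--         else:
--             runs.append((c, 1))
--     out = []
--     start = 0
--     for c, n in runs:
--         if n >= 3:
--             out.append((start, start + n - 1))
--         start += n
--     return out
-- ===== Notes on version B (the rewrite author's own statement) =====
-- stated objective: alternative
-- what changed: Replaces the index-based two-pointer while-loop scan with a two-phase pass: a run-length encoding of the string followed by a scan over the runs emitting those of length >= 3.
import Mathlib
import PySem

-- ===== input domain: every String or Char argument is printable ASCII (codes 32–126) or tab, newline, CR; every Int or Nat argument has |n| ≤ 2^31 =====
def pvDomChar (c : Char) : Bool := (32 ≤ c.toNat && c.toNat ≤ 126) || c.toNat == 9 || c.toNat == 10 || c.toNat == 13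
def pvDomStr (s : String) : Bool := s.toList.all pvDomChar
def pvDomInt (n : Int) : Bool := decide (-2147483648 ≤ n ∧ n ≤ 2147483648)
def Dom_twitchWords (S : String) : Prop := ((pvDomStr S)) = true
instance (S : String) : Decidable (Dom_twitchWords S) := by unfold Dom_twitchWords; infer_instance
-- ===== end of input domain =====

-- B replaces A's two-pointer index scan by a run-length encoding of the string
-- followed by a scan over the runs (objective: alternative decomposition, same cost).

-- ===== PORT A =====
-- inner while loop: 'while j < N and S[j] == S[i]: j += 1' (ci = S[i], fixed during the loop)
def twitchAInner (cs : List Char) (ci : Char) (j : Nat) : Nat :=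
  if h : j < cs.length then
    if cs[j] = ci then twitchAInner cs ci (j + 1) else j
  else j
termination_by cs.length - j

theorem twitchAInner_ge (cs : List Char) (ci : Char) (j : Nat) : j ≤ twitchAInner cs ci j := by
  fun_induction twitchAInner with
  | case1 => omega
  | case2 => omega
  | case3 => omega

theorem twitchAInner_gt (cs : List Char) (i : Nat) (h : i < cs.length) :
    i < twitchAInner cs cs[i] i := by
  rw [twitchAInner, dif_pos h, if_pos rfl]
  have := twitchAInner_ge cs cs[i] (i + 1)
  omega

-- outer while loop: state (i, res); j recomputed by the inner loop each iteration
def twitchAOuter (cs : List Char) (i : Nat) (res : List (Int × Int)) : List (Int × Int) :=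
  if h : i < cs.length then
    let j := twitchAInner cs cs[i] i
    twitchAOuter cs j
      (if 3 ≤ (j : Int) - (i : Int) then res ++ [((i : Int), (j : Int) - 1)] else res)
  else res
termination_by cs.length - i
decreasing_by
  have := twitchAInner_gt cs i h
  omega

def twitchWords (S : String) : List (Int × Int) := twitchAOuter S.toList 0 []

-- ===== PORT B =====
-- first loop of Source B: run-length encoding, appending/updating the last run
def rleStep (runs : List (Char × Nat)) (c : Char) : List (Char × Nat) :=
  match runs.getLast? with
  | some (d, n) => if d = c then runs.dropLast ++ [(c, n + 1)] else runs ++ [(c, 1)]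
  | none => runs ++ [(c, 1)]

-- second loop of Source B: state (out, start)
def emitStep (st : List (Int × Int) × Int) (r : Char × Nat) : List (Int × Int) × Int :=
  (if 3 ≤ r.2 then st.1 ++ [(st.2, st.2 + (r.2 : Int) - 1)] else st.1, st.2 + (r.2 : Int))

def twitchWords_alt (S : String) : List (Int × Int) :=
  (((S.toList.foldl rleStep []).foldl emitStep ([], 0))).1

-- ===== PRECONDITION & SPEC =====
def Spec_twitchWords (S : String) (out : List (Int × Int)) : Prop := out = twitchWords_alt S
instance (S : String) (out : List (Int × Int)) : Decidable (Spec_twitchWords S out) := by unfold Spec_twitchWords; infer_instance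

-- ===== CLAIM (what is proved, stated in full; the proofs are below) =====
def Claim_equal_twitchWords : Prop := ∀ (S : String), Dom_twitchWords S → Spec_twitchWords S (twitchWords S)

-- ===== LEMMAS AND PROOFS =====

-- canonical run-length encoding, by structural descent on the list
def runsOf : List Char → List (Char × Nat)
  | [] => []
  | c :: t => (c, 1 + (t.takeWhile (· = c)).length) :: runsOf (t.dropWhile (· = c))
termination_by l => l.length
decreasing_by
  have := (List.dropWhile_sublist (l := t) (p := (· = c))).length_le
  simp; omega

-- canonical emission
def emitRec : List (Char × Nat) → Int → List (Int × Int)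
  | [], _ => []
  | (_, n) :: t, s => (if 3 ≤ n then [(s, s + (n : Int) - 1)] else []) ++ emitRec t (s + (n : Int))

theorem dropWhile_eq_drop {α : Type} (p : α → Bool) (l : List α) :
    l.dropWhile p = l.drop (l.takeWhile p).length := by
  induction l with
  | nil => rfl
  | cons a t ih => by_cases h : p a <;> simp [List.dropWhile_cons, List.takeWhile_cons, h, ih]

theorem twitchAInner_eq (cs : List Char) (c : Char) (j : Nat) :
    twitchAInner cs c j = j + ((cs.drop j).takeWhile (· = c)).length := by
  fun_induction twitchAInner with
  | case1 j h hc ih =>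
    rw [List.drop_eq_getElem_cons h, List.takeWhile_cons]
    simp only [hc, decide_true, if_pos]
    simp [ih]
    omega
  | case2 j h hc =>
    rw [List.drop_eq_getElem_cons h, List.takeWhile_cons]
    simp [hc]
  | case3 j h =>
    rw [List.drop_eq_nil_of_le (by omega)]
    simp

theorem twitchAOuter_eq (cs : List Char) (i : Nat) (res : List (Int × Int)) :
    twitchAOuter cs i res = res ++ emitRec (runsOf (cs.drop i)) (i : Int) := by
  fun_induction twitchAOuter with
  | case1 i res h j ih =>
    have hd : cs.drop i = cs[i] :: cs.drop (i + 1) := List.drop_eq_getElem_cons h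
    have hin : twitchAInner cs cs[i] i
        = i + 1 + ((cs.drop (i + 1)).takeWhile (· = cs[i])).length := by
      rw [twitchAInner_eq, hd, List.takeWhile_cons, if_pos (by simp)]
      simp only [List.length_cons]
      omega
    have hrun : runsOf (cs.drop i)
        = (cs[i], 1 + ((cs.drop (i + 1)).takeWhile (· = cs[i])).length)
          :: runsOf (cs.drop (i + 1 + ((cs.drop (i + 1)).takeWhile (· = cs[i])).length)) := by
      rw [hd, runsOf, dropWhile_eq_drop, List.drop_drop]
    set L := ((cs.drop (i + 1)).takeWhile (· = cs[i])).length with hL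
    have hj : j = i + 1 + L := hin
    simp only [dite_eq_ite] at ih
    rw [ih, hj, hrun, emitRec]
    have e1 : ((i + 1 + L : Nat) : Int) = (i : Int) + ((1 + L : Nat) : Int) := by
      push_cast; ring
    by_cases hc : 3 ≤ 1 + L
    · have hc' : (3 : Int) ≤ ((i + 1 + L : Nat) : Int) - (i : Int) := by push_cast; omega
      rw [if_pos hc, if_pos hc', List.append_assoc, e1]
    · have hc' : ¬ (3 : Int) ≤ ((i + 1 + L : Nat) : Int) - (i : Int) := by push_cast; omega
      rw [if_neg hc, if_neg hc', List.nil_append, e1]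
  | case2 i res h =>
    rw [List.drop_eq_nil_of_le (by omega)]
    simp [runsOf, emitRec]

-- B-side: the foldl-with-last-update RLE equals runsOf
theorem rleStep_append (acc r : List (Char × Nat)) (c : Char) (hr : r ≠ []) :
    rleStep (acc ++ r) c = acc ++ rleStep r c := by
  rcases List.eq_nil_or_concat r with h | ⟨r', a, rfl⟩
  · exact absurd h hr
  · obtain ⟨d, n⟩ := a
    simp only [rleStep, ← List.append_assoc]
    by_cases hdc : d = c <;> simp [hdc]

theorem rleStep_ne_nil (r : List (Char × Nat)) (c : Char) : rleStep r c ≠ [] := by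
  unfold rleStep
  cases h : r.getLast? with
  | none => simp
  | some p => obtain ⟨d, n⟩ := p; by_cases hdc : d = c <;> simp [hdc]

theorem foldl_rleStep_append (cs : List Char) (acc r : List (Char × Nat)) (hr : r ≠ []) :
    cs.foldl rleStep (acc ++ r) = acc ++ cs.foldl rleStep r := by
  induction cs generalizing r with
  | nil => simp
  | cons c t ih =>
    simp only [List.foldl_cons]
    rw [rleStep_append acc r c hr, ih _ (rleStep_ne_nil r c)]

theorem foldl_rleStep_single (cs : List Char) (c : Char) (n : Nat) :
    cs.foldl rleStep [(c, n)] =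
      (c, n + (cs.takeWhile (· = c)).length) :: runsOf (cs.dropWhile (· = c)) := by
  induction cs generalizing c n with
  | nil => simp [runsOf]
  | cons d t ih =>
    by_cases hdc : d = c
    · subst hdc
      have h1 : rleStep [(d, n)] d = [(d, n + 1)] := by simp [rleStep]
      simp only [List.foldl_cons, h1, ih]
      simp [List.cons.injEq]
      omega
    · have h1 : rleStep [(c, n)] d = [(c, n)] ++ [(d, 1)] := by
        simp [rleStep]
        intro h'; exact absurd h'.symm hdc
      simp only [List.foldl_cons, h1]
      rw [foldl_rleStep_append _ _ _ (by simp), ih]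
      have hne : ¬ (d = c) := hdc
      simp [hne, runsOf]

theorem foldl_rleStep_eq_runsOf (cs : List Char) : cs.foldl rleStep [] = runsOf cs := by
  cases cs with
  | nil => simp [runsOf]
  | cons c t =>
    simp only [List.foldl_cons]
    have h0 : rleStep [] c = [(c, 1)] := by simp [rleStep]
    rw [h0, foldl_rleStep_single, runsOf]

theorem foldl_emitStep_eq (runs : List (Char × Nat)) (acc : List (Int × Int)) (s : Int) :
    (runs.foldl emitStep (acc, s)).1 = acc ++ emitRec runs s := by
  induction runs generalizing acc s with
  | nil => simp [emitRec]
  | cons r t ih =>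
    obtain ⟨c, n⟩ := r
    simp only [List.foldl_cons, emitStep, emitRec]
    rw [ih]
    by_cases h3 : 3 ≤ n <;> simp [h3]

-- ===== VERDICT (by name: the statement is the Claim_ definition above) =====
theorem twitchWords_spec : Claim_equal_twitchWords := by
  intro S _
  unfold Spec_twitchWords twitchWords twitchWords_alt
  rw [twitchAOuter_eq, foldl_rleStep_eq_runsOf, foldl_emitStep_eq]
  simp
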